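-- pv_equiv track=rewrite | github.com/vaporloungemktg/planogram | layout_engine.py | alphabetical_layout
-- ===== SOURCE A (Python) =====
-- def create_grid(rows, cols):
--     return [[None for _ in range(cols)] for _ in range(rows)]
--
-- def alphabetical_layout(products, rows, cols):
--
--     grid = create_grid(rows, cols)
--
--     # products = sorted(products, key=lambda x: x["product_name"])
--
--     row = 0
--     col = 0
--
--     for p in products:
--             name = p["product_name"]
--             shelves = int(p["shelves_needed"])
--
--             # Check if it fits in current column
--             if (rows - row) < shelves:
--                 col += 1
--                 row = 0
--
--             for _ in range(shelves):
--                 # Only place if within the physical grid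
--                 if col < cols and row < rows:
--                     grid[row][col] = name
--
--                 # Always advance row/col so no products are skipped
--                 row += 1
--                 if row >= rows:
--                     row = 0
--                     col += 1
--
--     return grid
-- ===== SOURCE B (Python) =====
-- def alphabetical_layout(products, rows, cols):
--     if rows <= 0:
--         return []
--
--     # Phase 1: plan — one linear position counter instead of (row, col).
--     runs = []
--     pos = 0
--     for p in products:
--         name = p["product_name"]
--         shelves = int(p["shelves_needed"])
--         if rows - pos % rows < shelves:
--             pos += rows - pos % rows          # snap to the top of the next column
--         runs.append((name, pos, shelves))
--         pos += max(shelves, 0)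
--
--     # Phase 2: render into a flat column-major buffer, then reshape.
--     size = rows * cols
--     flat = [None] * max(size, 0)
--     for name, start, shelves in runs:
--         for i in range(start, min(start + shelves, size)):
--             flat[i] = name
--     return [[flat[c * rows + r] for c in range(cols)] for r in range(rows)]
-- ===== Notes on version B (the rewrite author's own statement) =====
-- stated objective: alternative
-- what changed: Replaces A's single pass that mutates a 2-D grid while stepping a (row, col) cursor with a plan/render split: one pass computes each product's linear start position via a position counter with a column-snap, then the names are written into a flat column-major buffer and the buffer is reshaped into the row-major grid.
import Mathlib
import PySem

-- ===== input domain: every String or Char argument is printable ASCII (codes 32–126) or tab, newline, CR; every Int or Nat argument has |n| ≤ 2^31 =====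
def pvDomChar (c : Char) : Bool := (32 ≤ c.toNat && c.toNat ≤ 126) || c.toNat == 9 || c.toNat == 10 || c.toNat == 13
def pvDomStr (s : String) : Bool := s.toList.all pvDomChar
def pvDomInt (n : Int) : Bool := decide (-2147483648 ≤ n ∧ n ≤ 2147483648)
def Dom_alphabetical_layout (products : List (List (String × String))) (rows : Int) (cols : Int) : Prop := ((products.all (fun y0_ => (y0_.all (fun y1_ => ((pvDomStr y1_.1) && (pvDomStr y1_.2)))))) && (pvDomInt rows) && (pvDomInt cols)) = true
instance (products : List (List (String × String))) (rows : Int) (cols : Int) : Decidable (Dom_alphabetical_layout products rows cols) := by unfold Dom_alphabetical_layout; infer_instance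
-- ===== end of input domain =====

-- ===== PORT A =====
-- B re-implements A's 2-D walk as plan-then-render over a flat column-major buffer (objective: alternative decomposition).
-- Shared helpers: Python dict access p["k"] (first match) and int(p["shelves_needed"]).
def pvLookup (p : List (String × String)) (k : String) : Option String :=
  (p.find? (fun kv => kv.1 == k)).map (·.2)

def pvName (p : List (String × String)) : String :=
  (pvLookup p "product_name").getD ""

def pvShelves (p : List (String × String)) : Int :=
  ((pvLookup p "shelves_needed").bind PySem.Int.ofStr?).getD 0

def create_grid (rows cols : Int) : List (List (Option String)) :=
  (PySem.List.pyRange 0 rows).map (fun _ =>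
    (PySem.List.pyRange 0 cols).map (fun _ => (none : Option String)))

def pvAInner (rows cols : Int) (name : String)
    (s : List (List (Option String)) × Int × Int) (_i : Int) :
    List (List (Option String)) × Int × Int :=
  let g := if s.2.2 < cols ∧ s.2.1 < rows then
      s.1.modify s.2.1.toNat (fun rw => rw.set s.2.2.toNat (some name))
    else s.1
  let row := s.2.1 + 1
  if rows ≤ row then (g, 0, s.2.2 + 1) else (g, row, s.2.2)

def pvAStep (rows cols : Int) (s : List (List (Option String)) × Int × Int)
    (p : List (String × String)) : List (List (Option String)) × Int × Int :=
  let name := pvName p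
  let shelves := pvShelves p
  let s := if rows - s.2.1 < shelves then (s.1, (0 : Int), s.2.2 + 1) else s
  (PySem.List.pyRange 0 shelves).foldl (pvAInner rows cols name) s

def alphabetical_layout (products : List (List (String × String))) (rows : Int) (cols : Int) : List (List (Option String)) :=
  (products.foldl (pvAStep rows cols) (create_grid rows cols, 0, 0)).1

-- ===== PORT B =====
def pvSnap (rows pos shelves : Int) : Int :=
  if rows - PySem.Int.mod pos rows < shelves then pos + (rows - PySem.Int.mod pos rows) else pos

def pvPlanStep (rows : Int) (st : List (String × Int × Int) × Int) (p : List (String × String)) :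
    List (String × Int × Int) × Int :=
  let pos := pvSnap rows st.2 (pvShelves p)
  (st.1 ++ [(pvName p, pos, pvShelves p)], pos + max (pvShelves p) 0)

def pvWriteRun (size : Int) (flat : List (Option String)) (r : String × Int × Int) :
    List (Option String) :=
  (PySem.List.pyRange r.2.1 (min (r.2.1 + r.2.2) size)).foldl
    (fun fl i => fl.set i.toNat (some r.1)) flat

def pvRender (rows cols : Int) (flat : List (Option String)) : List (List (Option String)) :=
  (PySem.List.pyRange 0 rows).map (fun r =>
    (PySem.List.pyRange 0 cols).map (fun c => flat.getD (c * rows + r).toNat none))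

def alphabetical_layout_alt (products : List (List (String × String))) (rows : Int) (cols : Int) : List (List (Option String)) :=
  if rows ≤ 0 then []
  else
    let runs := (products.foldl (pvPlanStep rows) ([], 0)).1
    let size := rows * cols
    let flat := runs.foldl (pvWriteRun size) (List.replicate (max size 0).toNat (none : Option String))
    pvRender rows cols flat

-- ===== PRECONDITION & SPEC =====
-- Pre_ excludes exactly the inputs where Python A raises: a product missing the key
-- "product_name" or "shelves_needed" (KeyError), or whose shelves_needed string is not
-- accepted by int() (ValueError).
def Pre_alphabetical_layout (products : List (List (String × String))) (rows : Int) (cols : Int) : Prop :=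
  ∀ p ∈ products, (pvLookup p "product_name").isSome = true ∧
    ((pvLookup p "shelves_needed").bind PySem.Int.ofStr?).isSome = true
instance (products : List (List (String × String))) (rows : Int) (cols : Int) : Decidable (Pre_alphabetical_layout products rows cols) := by unfold Pre_alphabetical_layout; infer_instance

def pvWitness_alphabetical_layout : (List (List (String × String))) × Int × Int :=
  ([[("product_name", "cola"), ("shelves_needed", "2")], [("product_name", "chips"), ("shelves_needed", "1")]], 2, 2)

def Spec_alphabetical_layout (products : List (List (String × String))) (rows : Int) (cols : Int) (out : List (List (Option String))) : Prop := out = alphabetical_layout_alt products rows cols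
instance (products : List (List (String × String))) (rows : Int) (cols : Int) (out : List (List (Option String))) : Decidable (Spec_alphabetical_layout products rows cols out) := by unfold Spec_alphabetical_layout; infer_instance

-- ===== CLAIM (what is proved, stated in full; the proofs are below) =====
def Claim_equal_alphabetical_layout : Prop := ∀ (products : List (List (String × String))) (rows : Int) (cols : Int), Dom_alphabetical_layout products rows cols → Pre_alphabetical_layout products rows cols → Spec_alphabetical_layout products rows cols (alphabetical_layout products rows cols)

-- ===== LEMMAS AND PROOFS =====

-- Reference single pass combining B's two phases (proof-side only).
def pvSim (rows cols : Int) : List (List (String × String)) → List (Option String) × Int → List (Option String) × Int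
  | [], st => st
  | p :: t, (flat, pos) =>
      let pos' := pvSnap rows pos (pvShelves p)
      pvSim rows cols t
        (pvWriteRun (rows * cols) flat (pvName p, pos', pvShelves p), pos' + max (pvShelves p) 0)

-- Guarded linear writer: n single-cell writes starting at pos, skipping positions ≥ size.
def pvWriteSeg (name : String) (size : Int) (flat : List (Option String)) (pos : Int) : Nat → List (Option String)
  | 0 => flat
  | n + 1 => pvWriteSeg name size
      (if pos < size then flat.set pos.toNat (some name) else flat) (pos + 1) n

-- B's two-phase pipeline equals the single pass pvSim.
lemma pvB_sim (rows cols : Int) (l : List (List (String × String)))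
    (runs0 : List (String × Int × Int)) (pos : Int) (flat : List (Option String)) :
    (((l.foldl (pvPlanStep rows) (runs0, pos)).1).foldl (pvWriteRun (rows * cols)) flat,
      (l.foldl (pvPlanStep rows) (runs0, pos)).2)
    = pvSim rows cols l (runs0.foldl (pvWriteRun (rows * cols)) flat, pos) := by
  induction l generalizing runs0 pos flat with
  | nil => rfl
  | cons p t ih =>
      simp only [List.foldl_cons, pvSim, pvPlanStep]
      rw [ih]
      rw [List.foldl_append]
      rfl

-- pvWriteSeg ignores positions at or beyond size.
lemma pvWriteSeg_of_ge (name : String) (size : Int) :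
    ∀ (n : Nat) (flat : List (Option String)) (pos : Int), size ≤ pos →
      pvWriteSeg name size flat pos n = flat := by
  intro n
  induction n with
  | zero => intro flat pos _; rfl
  | succ n ih =>
      intro flat pos h
      simp only [pvWriteSeg, if_neg (by omega : ¬ pos < size)]
      exact ih flat (pos + 1) (by omega)

-- B's clipped-range run writer equals the guarded writer.
lemma pvWriteRun_eq_seg (name : String) (size : Int) :
    ∀ (n : Nat) (pos : Int) (flat : List (Option String)),
      (PySem.List.pyRange pos (min (pos + (n : Int)) size)).foldl
          (fun fl i => fl.set i.toNat (some name)) flat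
      = pvWriteSeg name size flat pos n := by
  intro n
  induction n with
  | zero =>
      intro pos flat
      rw [PySem.List.pyRange_one_eq_nil (by omega : min (pos + ((0 : Nat) : Int)) size ≤ pos)]
      rfl
  | succ n ih =>
      intro pos flat
      by_cases h : pos < size
      · rw [PySem.List.pyRange_one_cons (by push_cast; omega :
          pos < min (pos + ((n + 1 : Nat) : Int)) size)]
        simp only [List.foldl_cons]
        have hmm : min (pos + ((n + 1 : Nat) : Int)) size = min ((pos + 1) + (n : Int)) size := by
          push_cast; ring_nf
        rw [hmm, ih (pos + 1)]
        simp only [pvWriteSeg, if_pos h]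
      · rw [PySem.List.pyRange_one_eq_nil (by omega : min (pos + ((n + 1 : Nat) : Int)) size ≤ pos)]
        simp only [List.foldl_nil, pvWriteSeg, if_neg h]
        exact (pvWriteSeg_of_ge name size n flat (pos + 1) (by omega)).symm

lemma pvWriteRun_eq_seg' (name : String) (size : Int) (shelves pos : Int) (h : 0 ≤ pos)
    (flat : List (Option String)) :
    pvWriteRun size flat (name, pos, shelves) = pvWriteSeg name size flat pos shelves.toNat := by
  unfold pvWriteRun
  rcases le_or_gt 0 shelves with hs | hs
  · have hsh : shelves = ((shelves.toNat : Nat) : Int) := by omega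
    rw [hsh]
    exact pvWriteRun_eq_seg name size shelves.toNat pos flat
  · have h0 : shelves.toNat = 0 := by omega
    rw [h0, PySem.List.pyRange_one_eq_nil (by omega : min (pos + shelves) size ≤ pos)]
    rfl

lemma pvWriteSeg_length (name : String) (size : Int) :
    ∀ (n : Nat) (flat : List (Option String)) (pos : Int),
      (pvWriteSeg name size flat pos n).length = flat.length := by
  intro n
  induction n with
  | zero => intro flat pos; rfl
  | succ n ih =>
      intro flat pos
      rw [pvWriteSeg, ih]
      split <;> simp

-- Nat-level form of the render and the key set/modify commutation.
lemma pvRender_eq (rows cols : Int) (flat : List (Option String)) :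
    pvRender rows cols flat = (List.range rows.toNat).map (fun r =>
      (List.range cols.toNat).map (fun c => flat.getD (c * rows.toNat + r) none)) := by
  unfold pvRender
  rcases le_or_gt 0 rows with hr | hr
  · obtain ⟨R, rfl⟩ := Int.eq_ofNat_of_zero_le hr
    rcases le_or_gt 0 cols with hc | hc
    · obtain ⟨C, rfl⟩ := Int.eq_ofNat_of_zero_le hc
      simp only [PySem.List.pyRange_zero_natCast, List.map_map, Function.comp_def,
        Int.toNat_natCast]
      refine List.map_congr_left fun r _ => List.map_congr_left fun c _ => ?_
      have hcast : (((c : Int)) * (R : Int) + (r : Int)).toNat = c * R + r := by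
        have h1 : ((c : Int) * (R : Int) + (r : Int)) = ((c * R + r : Nat) : Int) := by
          push_cast; ring
        rw [h1, Int.toNat_natCast]
      rw [hcast]
    · rw [PySem.List.pyRange_one_eq_nil (by omega : cols ≤ 0)]
      rw [(by omega : cols.toNat = 0)]
      simp [PySem.List.pyRange_zero_natCast, List.map_map, Function.comp_def,
        List.map_const']
  · rw [PySem.List.pyRange_one_eq_nil (by omega : rows ≤ 0)]
    rw [(by omega : rows.toNat = 0)]
    simp

lemma pvRender_set (rows cols : Int) (hr : 0 < rows) (flat : List (Option String))
    (hlen : flat.length = (rows * cols).toNat) (pos : Int) (h0 : 0 ≤ pos)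
    (hlt : pos < rows * cols) (name : String) :
    (pvRender rows cols flat).modify (PySem.Int.mod pos rows).toNat
        (fun rw => rw.set (PySem.Int.floordiv pos rows).toNat (some name))
    = pvRender rows cols (flat.set pos.toNat (some name)) := by
  have hc : 0 < cols := by
    rcases le_or_gt cols 0 with h | h
    · exfalso; nlinarith
    · exact h
  obtain ⟨R, hRr⟩ := Int.eq_ofNat_of_zero_le (le_of_lt hr)
  obtain ⟨C, hCc⟩ := Int.eq_ofNat_of_zero_le (le_of_lt hc)
  obtain ⟨P, hPp⟩ := Int.eq_ofNat_of_zero_le h0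
  have hR0 : 0 < R := by omega
  subst hRr hCc hPp
  rw [pvRender_eq, pvRender_eq]
  simp only [PySem.Int.mod_natCast, PySem.Int.floordiv_natCast, Int.toNat_natCast]
  have hlenN : flat.length = R * C := by omega
  have hPN : P < R * C := by
    have : ((P : Int)) < ((R * C : Nat) : Int) := by push_cast at hlt ⊢; omega
    exact_mod_cast this
  have hidx : ∀ c r : Nat, c < C → r < R → c * R + r < R * C := by
    intro c r hcC hrR
    calc c * R + r < c * R + R := by omega
    _ = (c + 1) * R := by ring
    _ ≤ C * R := Nat.mul_le_mul_right R (by omega)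
    _ = R * C := Nat.mul_comm C R
  apply List.ext_getElem
  · simp
  · intro r h1 h2
    simp only [List.getElem_modify]
    have hrR : r < R := by simpa using h2
    simp only [List.getElem_map, List.getElem_range]
    by_cases hmr : P % R = r
    · rw [if_pos hmr]
      apply List.ext_getElem
      · simp
      · intro c h3 h4
        have hcC : c < C := by simpa using h4
        simp only [List.getElem_set, List.getElem_map, List.getElem_range]
        have hcr : c * R + r < flat.length := by rw [hlenN]; exact hidx c r hcC hrR
        rw [List.getD_eq_getElem _ _ hcr,
          List.getD_eq_getElem _ _ (by simpa using hcr)]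
        simp only [List.getElem_set]
        by_cases hdc : P / R = c
        · have h6 := Nat.div_add_mod P R
          rw [hdc, hmr, Nat.mul_comm R c] at h6
          rw [if_pos hdc, if_pos (by omega : P = c * R + r)]
        · rw [if_neg hdc, if_neg]
          intro hPeq
          exact hdc (by
            have h7 := (Nat.div_mod_unique hR0 (a := P) (d := c) (c := r)).2
              ⟨by rw [Nat.mul_comm]; omega, hrR⟩
            exact h7.1)
    · rw [if_neg hmr]
      refine List.map_congr_left fun c hcmem => ?_
      have hcC : c < C := List.mem_range.mp hcmem
      have hcr : c * R + r < flat.length := by rw [hlenN]; exact hidx c r hcC hrR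
      rw [List.getD_eq_getElem _ _ hcr, List.getD_eq_getElem _ _ (by simpa using hcr)]
      simp only [List.getElem_set]
      rw [if_neg]
      intro hPeq
      apply hmr
      have h7 := (Nat.div_mod_unique hR0 (a := P) (d := c) (c := r)).2
        ⟨by rw [Nat.mul_comm]; omega, hrR⟩
      exact h7.2

-- (pos+1) in mod/div normal form.
lemma pvAdvance (rows pos : Int) (hr : 0 < rows) :
    PySem.Int.mod (pos + 1) rows
      = (if rows ≤ PySem.Int.mod pos rows + 1 then 0 else PySem.Int.mod pos rows + 1) ∧
    PySem.Int.floordiv (pos + 1) rows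
      = (if rows ≤ PySem.Int.mod pos rows + 1 then PySem.Int.floordiv pos rows + 1
         else PySem.Int.floordiv pos rows) := by
  simp only [PySem.Int.mod_eq_emod_of_pos hr, PySem.Int.floordiv_eq_ediv_of_pos hr]
  have hqm := Int.mul_ediv_add_emod pos rows
  have hm0 := Int.emod_nonneg pos (ne_of_gt hr)
  have hmlt := Int.emod_lt_of_pos pos hr
  by_cases hcase : rows ≤ pos % rows + 1
  · have h1 : pos + 1 = rows * (pos / rows + 1) := by rw [mul_add, mul_one]; linarith
    rw [if_pos hcase, if_pos hcase, h1, Int.mul_emod_right,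
      Int.mul_ediv_cancel_left _ (ne_of_gt hr)]
    exact ⟨rfl, rfl⟩
  · have h1 : pos + 1 = (pos % rows + 1) + (pos / rows) * rows := by rw [mul_comm]; linarith
    rw [if_neg hcase, if_neg hcase, h1, Int.add_mul_emod_self_right _ _ _,
      Int.add_mul_ediv_right _ _ (ne_of_gt hr),
      Int.emod_eq_of_lt (by omega) (by omega), Int.ediv_eq_zero_of_lt (by omega) (by omega)]
    exact ⟨rfl, by omega⟩

-- Appending one write at the back of a segment.
lemma pvWriteSeg_succ_back (name : String) (size : Int) :
    ∀ (n : Nat) (flat : List (Option String)) (pos : Int),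
      pvWriteSeg name size flat pos (n + 1)
      = (if pos + (n : Int) < size
         then (pvWriteSeg name size flat pos n).set (pos + (n : Int)).toNat (some name)
         else pvWriteSeg name size flat pos n) := by
  intro n
  induction n with
  | zero => intro flat pos; simp [pvWriteSeg]
  | succ n ih =>
      intro flat pos
      rw [show pvWriteSeg name size flat pos (n + 1 + 1)
            = pvWriteSeg name size
                (if pos < size then flat.set pos.toNat (some name) else flat) (pos + 1) (n + 1)
          from rfl,
        show pvWriteSeg name size flat pos (n + 1)
            = pvWriteSeg name size
                (if pos < size then flat.set pos.toNat (some name) else flat) (pos + 1) n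
          from rfl,
        ih]
      have hc : (pos + 1) + (n : Int) = pos + ((n + 1 : Nat) : Int) := by push_cast; ring
      rw [hc]

-- One inner step of A on a state in render/mod/div normal form.
lemma pvAInner_step (rows cols : Int) (hr : 0 < rows) (name : String)
    (flat : List (Option String)) (hlen : flat.length = (rows * cols).toNat)
    (pos : Int) (h0 : 0 ≤ pos) (i : Int) :
    pvAInner rows cols name
      (pvRender rows cols flat, PySem.Int.mod pos rows, PySem.Int.floordiv pos rows) i
    = (pvRender rows cols (if pos < rows * cols then flat.set pos.toNat (some name) else flat),
        PySem.Int.mod (pos + 1) rows, PySem.Int.floordiv (pos + 1) rows) := by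
  have hml := PySem.Int.mod_lt pos hr
  have hm0 := PySem.Int.mod_nonneg pos hr
  have hadv := pvAdvance rows pos hr
  have hg : (if PySem.Int.floordiv pos rows < cols ∧ PySem.Int.mod pos rows < rows then
        (pvRender rows cols flat).modify (PySem.Int.mod pos rows).toNat
          (fun rw => rw.set (PySem.Int.floordiv pos rows).toNat (some name))
      else pvRender rows cols flat)
      = pvRender rows cols (if pos < rows * cols then flat.set pos.toNat (some name) else flat) := by
    by_cases hlt : pos < rows * cols
    · rw [if_pos ⟨by
          rw [PySem.Int.floordiv_lt_iff_lt_mul hr]; linarith [hlt], hml⟩, if_pos hlt]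
      exact pvRender_set rows cols hr flat hlen pos h0 hlt name
    · rw [if_neg (by
        rintro ⟨h1, _⟩
        rw [PySem.Int.floordiv_lt_iff_lt_mul hr] at h1
        exact hlt (by linarith [h1])), if_neg hlt]
  simp only [pvAInner]
  rw [hg, hadv.1, hadv.2]
  split <;> rfl

-- A's inner shelf loop in normal form.
lemma pvAInner_loop (rows cols : Int) (hr : 0 < rows) (name : String) :
    ∀ (n : Nat) (flat : List (Option String)) (pos : Int), 0 ≤ pos →
      flat.length = (rows * cols).toNat →
      (PySem.List.pyRange 0 (n : Int)).foldl (pvAInner rows cols name)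
        (pvRender rows cols flat, PySem.Int.mod pos rows, PySem.Int.floordiv pos rows)
      = (pvRender rows cols (pvWriteSeg name (rows * cols) flat pos n),
          PySem.Int.mod (pos + (n : Int)) rows, PySem.Int.floordiv (pos + (n : Int)) rows) := by
  intro n
  induction n with
  | zero =>
      intro flat pos h0 hlen
      rw [PySem.List.pyRange_one_eq_nil (by simp)]
      simp [pvWriteSeg]
  | succ n ih =>
      intro flat pos h0 hlen
      rw [show ((n + 1 : Nat) : Int) = (n : Int) + 1 by push_cast; ring,
        PySem.List.pyRange_one_succ_right (by positivity), List.foldl_append,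
        ih flat pos h0 hlen, List.foldl_cons, List.foldl_nil,
        pvAInner_step rows cols hr name _ (by rw [pvWriteSeg_length]; exact hlen)
          (pos + (n : Int)) (by positivity) (n : Int),
        pvWriteSeg_succ_back]
      rw [show pos + ((n : Int) + 1) = pos + (n : Int) + 1 by ring]

-- A's product fold in normal form equals render of pvSim.
lemma pvA_sim (rows cols : Int) (hr : 0 < rows) :
    ∀ (l : List (List (String × String))) (flat : List (Option String)) (pos : Int),
      0 ≤ pos → flat.length = (rows * cols).toNat →
      l.foldl (pvAStep rows cols)
        (pvRender rows cols flat, PySem.Int.mod pos rows, PySem.Int.floordiv pos rows)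
      = (pvRender rows cols (pvSim rows cols l (flat, pos)).1,
          PySem.Int.mod (pvSim rows cols l (flat, pos)).2 rows,
          PySem.Int.floordiv (pvSim rows cols l (flat, pos)).2 rows) := by
  intro l
  induction l with
  | nil => intro flat pos h0 hlen; rfl
  | cons p t ih =>
      intro flat pos h0 hlen
      have hm0 := PySem.Int.mod_nonneg pos hr
      have hml := PySem.Int.mod_lt pos hr
      have h0' : 0 ≤ pvSnap rows pos (pvShelves p) := by unfold pvSnap; split <;> omega
      have hsnap :
          (if rows - PySem.Int.mod pos rows < pvShelves p then
              (pvRender rows cols flat, (0 : Int), PySem.Int.floordiv pos rows + 1)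
            else (pvRender rows cols flat, PySem.Int.mod pos rows, PySem.Int.floordiv pos rows))
          = (pvRender rows cols flat, PySem.Int.mod (pvSnap rows pos (pvShelves p)) rows,
              PySem.Int.floordiv (pvSnap rows pos (pvShelves p)) rows) := by
        unfold pvSnap
        by_cases hc : rows - PySem.Int.mod pos rows < pvShelves p
        · rw [if_pos hc, if_pos hc]
          have hqm := Int.mul_ediv_add_emod pos rows
          have h1 : pos + (rows - PySem.Int.mod pos rows)
              = rows * (PySem.Int.floordiv pos rows + 1) := by
            rw [mul_add, mul_one, PySem.Int.floordiv_eq_ediv_of_pos hr,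
              PySem.Int.mod_eq_emod_of_pos hr]
            linarith
          rw [h1]
          simp only [PySem.Int.mod_eq_emod_of_pos hr, PySem.Int.floordiv_eq_ediv_of_pos hr,
            Int.mul_emod_right, Int.mul_ediv_cancel_left _ (ne_of_gt hr)]
        · rw [if_neg hc, if_neg hc]
      have hn : ((pvShelves p).toNat : Int) = max (pvShelves p) 0 := by omega
      have hrange : PySem.List.pyRange 0 (pvShelves p)
          = PySem.List.pyRange 0 (((pvShelves p).toNat : Nat) : Int) := by
        rcases le_or_gt 0 (pvShelves p) with h | h
        · rw [Int.toNat_of_nonneg h]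
        · rw [PySem.List.pyRange_one_eq_nil (by omega),
            PySem.List.pyRange_one_eq_nil (by omega)]
      simp only [List.foldl_cons, pvAStep, pvSim]
      rw [hsnap, hrange,
        pvAInner_loop rows cols hr (pvName p) (pvShelves p).toNat flat
          (pvSnap rows pos (pvShelves p)) h0' hlen,
        ih _ (pvSnap rows pos (pvShelves p) + ((pvShelves p).toNat : Int)) (by omega)
          (by rw [pvWriteSeg_length]; exact hlen),
        pvWriteRun_eq_seg' (pvName p) (rows * cols) (pvShelves p) _ h0' flat, hn]

-- rows ≤ 0 : A's grid is [] and stays [].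
lemma pvAInner_nil (rows cols : Int) (name : String) :
    ∀ (l : List Int) (s : List (List (Option String)) × Int × Int), s.1 = [] →
      (l.foldl (pvAInner rows cols name) s).1 = [] := by
  intro l
  induction l with
  | nil => intro s hs; simpa using hs
  | cons i t ih =>
      intro s hs
      refine ih _ ?_
      simp only [pvAInner, hs, List.modify_nil]
      split <;> simp

lemma pvA_nil (rows cols : Int) (hr : rows ≤ 0) (l : List (List (String × String)))
    (s : List (List (Option String)) × Int × Int) (hs : s.1 = []) :
    (l.foldl (pvAStep rows cols) s).1 = [] := by
  induction l generalizing s with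
  | nil => simpa using hs
  | cons p t ih =>
      refine ih _ ?_
      simp only [pvAStep]
      refine pvAInner_nil rows cols _ _ _ ?_
      split <;> simpa using hs

lemma pvCreate_eq_render (rows cols : Int) :
    create_grid rows cols
      = pvRender rows cols (List.replicate (max (rows * cols) 0).toNat (none : Option String)) := by
  simp only [create_grid, pvRender]
  refine List.map_congr_left (fun r _ => ?_)
  refine List.map_congr_left (fun c _ => ?_)
  simp [List.getD, List.getElem?_replicate]
  split <;> rfl

-- ===== VERDICT (by name: the statement is the Claim_ definition above) =====
theorem alphabetical_layout_spec : Claim_equal_alphabetical_layout := by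
  intro products rows cols _hdom _hpre
  unfold Spec_alphabetical_layout alphabetical_layout alphabetical_layout_alt
  by_cases hr : rows ≤ 0
  · simp only [hr, if_true]
    exact pvA_nil rows cols hr products _ (by
      simp [create_grid, PySem.List.pyRange_one_eq_nil hr])
  · have hr' : 0 < rows := by omega
    simp only [hr, if_false]
    have h := pvA_sim rows cols hr' products
      (List.replicate (max (rows * cols) 0).toNat (none : Option String)) 0 le_rfl
      (by simp; omega)
    have hb := pvB_sim rows cols products [] 0
      (List.replicate (max (rows * cols) 0).toNat (none : Option String))
    simp only [List.foldl_nil] at hb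
    rw [pvCreate_eq_render]
    have hmod : PySem.Int.mod 0 rows = 0 := by
      rw [PySem.Int.mod_eq_emod_of_pos hr']; simp
    have hdiv : PySem.Int.floordiv 0 rows = 0 := by
      rw [PySem.Int.floordiv_eq_ediv_of_pos hr']; simp
    rw [hmod, hdiv] at h
    rw [h]
    exact congrArg (pvRender rows cols) (congrArg Prod.fst hb).symm
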